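-- pv_equiv track=rewrite | github.com/sunghun7511/Writeup | ctf/codegate/2018-Final/misc/Random Picross/test.py | find_common_rows
-- ===== SOURCE A (Python) =====
-- SYMBOL_EMPTY = 0
--
-- SYMBOL_X = 1
--
-- SYMBOL_FILLED = 2
--
-- def find_common_rows(rows, size):
--     row_x = [SYMBOL_X] * size
--     row_filled = [SYMBOL_FILLED] * size
--
--     for row in rows:
--         for i in range(0, size):
--             if row[i] == SYMBOL_FILLED:
--                 row_x[i] = SYMBOL_EMPTY
--             if row[i] == SYMBOL_X:
--                 row_filled[i] = SYMBOL_EMPTY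
--
--     return [x + y for x, y in zip(row_x, row_filled)]
-- ===== SOURCE B (Python) =====
-- SYMBOL_EMPTY = 0
--
-- SYMBOL_X = 1
--
-- SYMBOL_FILLED = 2
--
-- def find_common_rows(rows, size):
--     result = []
--     for i in range(size):
--         col = [row[i] for row in rows]
--         result.append((0 if SYMBOL_FILLED in col else 1)
--                       + (0 if SYMBOL_X in col else 2))
--     return result
-- ===== Notes on version B (the rewrite author's own statement) =====
-- stated objective: alternative
-- what changed: B transposes the traversal: one pass over columns, materialising each column and computing its value directly from two membership tests, instead of A's row-major double loop mutating two preallocated marker rows that are zipped and summed at the end.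
import Mathlib
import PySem

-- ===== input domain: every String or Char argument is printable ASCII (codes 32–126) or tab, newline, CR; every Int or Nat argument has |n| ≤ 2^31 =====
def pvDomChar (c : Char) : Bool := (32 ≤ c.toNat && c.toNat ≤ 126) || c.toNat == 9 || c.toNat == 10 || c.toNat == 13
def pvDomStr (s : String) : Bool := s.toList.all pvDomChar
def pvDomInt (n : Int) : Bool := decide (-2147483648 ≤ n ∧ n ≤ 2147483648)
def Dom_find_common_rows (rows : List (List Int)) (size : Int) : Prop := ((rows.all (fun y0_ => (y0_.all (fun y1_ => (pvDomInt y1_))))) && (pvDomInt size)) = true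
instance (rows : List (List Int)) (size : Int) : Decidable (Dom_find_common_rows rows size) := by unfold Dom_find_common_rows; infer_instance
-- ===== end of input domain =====

-- B transposes A's row-major double loop over two mutated marker rows into a
-- column-major single pass computing each value from two membership tests (alternative decomposition, same cost).


-- ===== PORT A =====
-- one body-of-the-inner-loop helper (exact on in-range indices; Pre_ excludes the out-of-range IndexError inputs)
def pvStepA (row : List Int) (st : List Int × List Int) (i : Int) : List Int × List Int :=
  let v := (PySem.List.pyGet? row i).getD 0
  (if v = 2 then st.1.set i.toNat 0 else st.1,
   if v = 1 then st.2.set i.toNat 0 else st.2)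

def find_common_rows (rows : List (List Int)) (size : Int) : List Int :=
  let st := rows.foldl
    (fun st row => (PySem.List.pyRange 0 size 1).foldl (pvStepA row) st)
    (List.replicate size.toNat 1, List.replicate size.toNat 2)
  (st.1.zip st.2).map (fun p => p.1 + p.2)

-- ===== PORT B =====
def find_common_rows_alt (rows : List (List Int)) (size : Int) : List Int :=
  (PySem.List.pyRange 0 size 1).map (fun i =>
    let col := rows.map (fun row => (PySem.List.pyGet? row i).getD 0)
    (if col.contains 2 then 0 else 1) + (if col.contains 1 then 0 else 2))

-- ===== PRECONDITION & SPEC =====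
-- Pre_ excludes exactly the inputs where Python A raises IndexError: a positive size with some row shorter than size.
def Pre_find_common_rows (rows : List (List Int)) (size : Int) : Prop :=
  0 < size → ∀ row ∈ rows, size ≤ (row.length : Int)
instance (rows : List (List Int)) (size : Int) : Decidable (Pre_find_common_rows rows size) := by
  unfold Pre_find_common_rows; infer_instance
def pvWitness_find_common_rows : List (List Int) × Int := ([[2, 1], [2, 0]], 2)

def Spec_find_common_rows (rows : List (List Int)) (size : Int) (out : List Int) : Prop := out = find_common_rows_alt rows size
instance (rows : List (List Int)) (size : Int) (out : List Int) : Decidable (Spec_find_common_rows rows size out) := by unfold Spec_find_common_rows; infer_instance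

-- ===== CLAIM (what is proved, stated in full; the proofs are below) =====
def Claim_equal_find_common_rows : Prop := ∀ (rows : List (List Int)) (size : Int), Dom_find_common_rows rows size → Pre_find_common_rows rows size → Spec_find_common_rows rows size (find_common_rows rows size)

-- ===== LEMMAS AND PROOFS =====

-- the value A reads at column j of a row
def pvVal (row : List Int) (j : Nat) : Int := (PySem.List.pyGet? row (j : Int)).getD 0

theorem pv_len_inner (row : List Int) (l : List Int) (st : List Int × List Int) :
    (l.foldl (pvStepA row) st).1.length = st.1.length ∧
    (l.foldl (pvStepA row) st).2.length = st.2.length := by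
  induction l generalizing st with
  | nil => exact ⟨rfl, rfl⟩
  | cons i l ih =>
      simp only [List.foldl_cons]
      rcases ih (pvStepA row st i) with ⟨h1, h2⟩
      refine ⟨h1.trans ?_, h2.trans ?_⟩ <;> simp [pvStepA] <;> split <;> simp

theorem pv_inner_get1 (row : List Int) (m : Nat) (st : List Int × List Int) (j : Nat) :
    ((PySem.List.pyRange 0 (m : Int) 1).foldl (pvStepA row) st).1[j]? =
      if j < m ∧ j < st.1.length ∧ pvVal row j = 2 then some 0 else st.1[j]? := by
  induction m generalizing st with
  | zero => simp [PySem.List.pyRange_one_eq_nil]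
  | succ m ih =>
      have hc : ((m + 1 : Nat) : Int) = (m : Int) + 1 := by push_cast; ring
      rw [hc, PySem.List.pyRange_one_succ_right (by positivity), List.foldl_append]
      simp only [List.foldl_cons, List.foldl_nil]
      have hlen := (pv_len_inner row (PySem.List.pyRange 0 (m : Int) 1) st).1
      simp only [pvStepA]
      by_cases hv : (PySem.List.pyGet? row (m : Int)).getD 0 = 2
      · simp only [hv, if_true, Int.toNat_natCast]
        rw [List.getElem?_set]
        by_cases hjm : m = j
        · subst hjm
          rw [if_pos rfl, hlen]
          by_cases hlt : m < st.1.length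
          · simp [hlt, show pvVal row m = 2 from hv]
          · have hnone : st.1[m]? = none := by rw [List.getElem?_eq_none_iff]; omega
            rw [if_neg hlt, if_neg (by tauto : ¬ (m < m + 1 ∧ m < st.1.length ∧ pvVal row m = 2)), hnone]
        · rw [if_neg hjm, ih st]
          have he : (j < m + 1 ∧ j < st.1.length ∧ pvVal row j = 2) ↔
              (j < m ∧ j < st.1.length ∧ pvVal row j = 2) := by
            constructor <;> rintro ⟨h, h', h''⟩ <;> exact ⟨by omega, h', h''⟩
          rw [if_congr he rfl rfl]
      · rw [if_neg hv, ih st]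
        by_cases hjm : j = m
        · subst hjm
          have h2 : ¬ pvVal row j = 2 := by simpa [pvVal] using hv
          simp [h2]
        · have he : (j < m ∧ j < st.1.length ∧ pvVal row j = 2) ↔
              (j < m + 1 ∧ j < st.1.length ∧ pvVal row j = 2) := by
            constructor <;> rintro ⟨h, h', h''⟩ <;> exact ⟨by omega, h', h''⟩
          rw [if_congr he rfl rfl]

theorem pv_inner_get2 (row : List Int) (m : Nat) (st : List Int × List Int) (j : Nat) :
    ((PySem.List.pyRange 0 (m : Int) 1).foldl (pvStepA row) st).2[j]? =
      if j < m ∧ j < st.2.length ∧ pvVal row j = 1 then some 0 else st.2[j]? := by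
  induction m generalizing st with
  | zero => simp [PySem.List.pyRange_one_eq_nil]
  | succ m ih =>
      have hc : ((m + 1 : Nat) : Int) = (m : Int) + 1 := by push_cast; ring
      rw [hc, PySem.List.pyRange_one_succ_right (by positivity), List.foldl_append]
      simp only [List.foldl_cons, List.foldl_nil]
      have hlen := (pv_len_inner row (PySem.List.pyRange 0 (m : Int) 1) st).2
      simp only [pvStepA]
      by_cases hv : (PySem.List.pyGet? row (m : Int)).getD 0 = 1
      · simp only [hv, if_true, Int.toNat_natCast]
        rw [List.getElem?_set]
        by_cases hjm : m = j
        · subst hjm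
          rw [if_pos rfl, hlen]
          by_cases hlt : m < st.2.length
          · simp [hlt, show pvVal row m = 1 from hv]
          · have hnone : st.2[m]? = none := by rw [List.getElem?_eq_none_iff]; omega
            rw [if_neg hlt, if_neg (by tauto : ¬ (m < m + 1 ∧ m < st.2.length ∧ pvVal row m = 1)), hnone]
        · rw [if_neg hjm, ih st]
          have he : (j < m + 1 ∧ j < st.2.length ∧ pvVal row j = 1) ↔
              (j < m ∧ j < st.2.length ∧ pvVal row j = 1) := by
            constructor <;> rintro ⟨h, h', h''⟩ <;> exact ⟨by omega, h', h''⟩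
          rw [if_congr he rfl rfl]
      · rw [if_neg hv, ih st]
        by_cases hjm : j = m
        · subst hjm
          have h2 : ¬ pvVal row j = 1 := by simpa [pvVal] using hv
          simp [h2]
        · have he : (j < m ∧ j < st.2.length ∧ pvVal row j = 1) ↔
              (j < m + 1 ∧ j < st.2.length ∧ pvVal row j = 1) := by
            constructor <;> rintro ⟨h, h', h''⟩ <;> exact ⟨by omega, h', h''⟩
          rw [if_congr he rfl rfl]

theorem pv_outer_get1 (rows : List (List Int)) (m : Nat) (st : List Int × List Int) (j : Nat) :
    ((rows.foldl (fun st row => (PySem.List.pyRange 0 (m : Int) 1).foldl (pvStepA row) st) st).1)[j]? =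
      if j < m ∧ j < st.1.length ∧ rows.any (fun row => pvVal row j == 2) then some 0 else st.1[j]? := by
  induction rows generalizing st with
  | nil => simp
  | cons row rest ih =>
      simp only [List.foldl_cons, List.any_cons]
      rw [ih]
      have hlen := (pv_len_inner row (PySem.List.pyRange 0 (m : Int) 1) st).1
      rw [hlen, pv_inner_get1]
      split_ifs <;> simp_all <;> tauto

theorem pv_outer_get2 (rows : List (List Int)) (m : Nat) (st : List Int × List Int) (j : Nat) :
    ((rows.foldl (fun st row => (PySem.List.pyRange 0 (m : Int) 1).foldl (pvStepA row) st) st).2)[j]? =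
      if j < m ∧ j < st.2.length ∧ rows.any (fun row => pvVal row j == 1) then some 0 else st.2[j]? := by
  induction rows generalizing st with
  | nil => simp
  | cons row rest ih =>
      simp only [List.foldl_cons, List.any_cons]
      rw [ih]
      have hlen := (pv_len_inner row (PySem.List.pyRange 0 (m : Int) 1) st).2
      rw [hlen, pv_inner_get2]
      split_ifs <;> simp_all <;> tauto

-- ===== VERDICT (by name: the statement is the Claim_ definition above) =====
theorem find_common_rows_spec : Claim_equal_find_common_rows := by
  intro rows size _ _
  unfold Spec_find_common_rows find_common_rows find_common_rows_alt
  have hr : PySem.List.pyRange 0 size 1 = PySem.List.pyRange 0 (size.toNat : Int) 1 := by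
    by_cases hs : 0 ≤ size
    · rw [Int.toNat_of_nonneg hs]
    · rw [PySem.List.pyRange_one_eq_nil (by omega), PySem.List.pyRange_one_eq_nil (by omega)]
  rw [hr]
  apply List.ext_getElem?
  intro j
  have h1 := pv_outer_get1 rows size.toNat (List.replicate size.toNat 1, List.replicate size.toNat 2) j
  have h2 := pv_outer_get2 rows size.toNat (List.replicate size.toNat 1, List.replicate size.toNat 2) j
  simp only [List.length_replicate, List.getElem?_replicate] at h1 h2
  rw [List.getElem?_map, List.getElem?_map, PySem.List.getElem?_pyRange_one,
      List.zip_eq_zipWith, List.getElem?_zipWith]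
  simp only [sub_zero, Int.toNat_natCast]
  by_cases hj : j < size.toNat
  · have h1' : (List.foldl (fun st row => List.foldl (pvStepA row) st (PySem.List.pyRange 0 (size.toNat : Int) 1))
        (List.replicate size.toNat 1, List.replicate size.toNat 2) rows).1[j]? =
          some (if rows.any (fun row => pvVal row j == 2) then (0 : Int) else 1) := by
      rw [h1]; by_cases h : rows.any (fun row => pvVal row j == 2) <;> simp [h, hj]
    have h2' : (List.foldl (fun st row => List.foldl (pvStepA row) st (PySem.List.pyRange 0 (size.toNat : Int) 1))
        (List.replicate size.toNat 1, List.replicate size.toNat 2) rows).2[j]? =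
          some (if rows.any (fun row => pvVal row j == 1) then (0 : Int) else 2) := by
      rw [h2]; by_cases h : rows.any (fun row => pvVal row j == 1) <;> simp [h, hj]
    rw [h1', h2']
    have hcon : ∀ c : Int,
        (rows.map (fun row => (PySem.List.pyGet? row (0 + (j : Int))).getD 0)).contains c =
          rows.any (fun row => pvVal row j == c) := by
      intro c
      rw [List.contains_map]
      refine List.any_congr rfl (fun row => ?_)
      simp [pvVal, BEq.comm]
    simp only [if_pos hj, Option.map_some, hcon]
  · have h1' : (List.foldl (fun st row => List.foldl (pvStepA row) st (PySem.List.pyRange 0 (size.toNat : Int) 1))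
        (List.replicate size.toNat 1, List.replicate size.toNat 2) rows).1[j]? = none := by
      rw [h1]; simp [hj]
    rw [h1', if_neg hj]
    simp
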